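-- pv_equiv track=rewrite | github.com/vikrantwiz02/Vyakt | app.py | _candidate_tokens
-- ===== SOURCE A (Python) =====
-- def _candidate_tokens(token):
--     candidates = [token]
--     if token.endswith("ies") and len(token) > 3:
--         candidates.append(token[:-3] + "y")
--     if token.endswith("ing") and len(token) > 4:
--         base = token[:-3]
--         candidates.append(base)
--         candidates.append(base + "e")
--     if token.endswith("ed") and len(token) > 3:
--         base = token[:-2]
--         candidates.append(base)
--         candidates.append(base + "e")
--     if token.endswith("es") and len(token) > 3:
--         candidates.append(token[:-2])
--     if token.endswith("s") and len(token) > 2: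
--         candidates.append(token[:-1])
--
--     deduped = []
--     seen = set()
--     for item in candidates:
--         if item and item not in seen:
--             seen.add(item)
--             deduped.append(item)
--     return deduped
-- ===== SOURCE B (Python) =====
-- def _candidate_tokens(token):
--     # Mutually exclusive suffix case analysis: the five rule suffixes overlap only
--     # in the chains ies->es->s and es->s, so one elif chain with the combined
--     # candidate lists covers every combination A's cumulative ifs can produce,
--     # and the produced candidates are pairwise distinct (different lengths, and
--     # 'ies' forces the char before the dropped tail to be 'i', never 'y'),
--     # so no dedup is needed: only the empty token must be filtered out.
--     n = len(token)
--     if n > 3 and token.endswith("ies"):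
--         cands = [token, token[:-3] + "y", token[:-2], token[:-1]]
--     elif n > 4 and token.endswith("ing"):
--         cands = [token, token[:-3], token[:-3] + "e"]
--     elif n > 3 and token.endswith("ed"):
--         cands = [token, token[:-2], token[:-2] + "e"]
--     elif n > 3 and token.endswith("es"):
--         cands = [token, token[:-2], token[:-1]]
--     elif n > 2 and token.endswith("s"):
--         cands = [token, token[:-1]]
--     else:
--         cands = [token]
--     return [c for c in cands if c]
-- ===== Notes on version B (the rewrite author's own statement) =====
-- stated objective: simpler
-- what changed: A applies all five suffix rules cumulatively and then deduplicates with a seen-set loop; B does one mutually exclusive elif case analysis on the suffix (ies / ing / ed / es / s) whose branch emits the complete candidate list directly, proves the candidates pairwise distinct by construction, and so drops the dedup entirely, keeping only the empty-string filter.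
import Mathlib
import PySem

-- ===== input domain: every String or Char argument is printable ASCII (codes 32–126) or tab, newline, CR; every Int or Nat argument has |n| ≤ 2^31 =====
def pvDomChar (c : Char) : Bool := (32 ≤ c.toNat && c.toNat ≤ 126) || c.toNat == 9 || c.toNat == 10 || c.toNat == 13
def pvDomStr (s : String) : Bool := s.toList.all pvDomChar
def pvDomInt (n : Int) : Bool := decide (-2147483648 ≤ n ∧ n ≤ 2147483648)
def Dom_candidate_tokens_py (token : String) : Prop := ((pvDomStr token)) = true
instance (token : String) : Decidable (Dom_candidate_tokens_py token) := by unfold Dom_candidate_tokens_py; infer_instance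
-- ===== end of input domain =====

-- B replaces A's cumulative suffix if-cascade plus seen-set dedup loop by one mutually
-- exclusive elif case analysis whose branch lists are duplicate-free by construction,
-- so the dedup disappears and only empty strings are filtered (objective: simpler).

-- ===== PORT A =====
-- the five if-branches building `candidates`, transliterated in order
def pvCandsA (token : String) : List String :=
  let candidates := [token]
  let candidates :=
    if PySem.Str.endswith token "ies" && decide (3 < PySem.Str.len token) then
      candidates ++ [PySem.Str.slice token none (some (-3)) ++ "y"] else candidates
  let candidates :=
    if PySem.Str.endswith token "ing" && decide (4 < PySem.Str.len token) then
      let base := PySem.Str.slice token none (some (-3))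
      (candidates ++ [base]) ++ [base ++ "e"] else candidates
  let candidates :=
    if PySem.Str.endswith token "ed" && decide (3 < PySem.Str.len token) then
      let base := PySem.Str.slice token none (some (-2))
      (candidates ++ [base]) ++ [base ++ "e"] else candidates
  let candidates :=
    if PySem.Str.endswith token "es" && decide (3 < PySem.Str.len token) then
      candidates ++ [PySem.Str.slice token none (some (-2))] else candidates
  if PySem.Str.endswith token "s" && decide (2 < PySem.Str.len token) then
    candidates ++ [PySem.Str.slice token none (some (-1))] else candidates

-- A's dedup loop over `candidates` with a `seen` set
def candidate_tokens_py (token : String) : List String :=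
  ((pvCandsA token).foldl
    (fun (st : PySem.Set String × List String) item =>
      if item != "" && !(PySem.Set.contains st.1 item) then
        (PySem.Set.add st.1 item, st.2 ++ [item]) else st)
    (PySem.Set.empty, [])).2

-- ===== PORT B =====
-- mutually exclusive elif chain; candidates are pairwise distinct, so only empties are filtered
def candidate_tokens_py_alt (token : String) : List String :=
  let n := PySem.Str.len token
  let cands :=
    if decide (3 < n) && PySem.Str.endswith token "ies" then
      [token, PySem.Str.slice token none (some (-3)) ++ "y",
       PySem.Str.slice token none (some (-2)), PySem.Str.slice token none (some (-1))]
    else if decide (4 < n) && PySem.Str.endswith token "ing" then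
      [token, PySem.Str.slice token none (some (-3)),
       PySem.Str.slice token none (some (-3)) ++ "e"]
    else if decide (3 < n) && PySem.Str.endswith token "ed" then
      [token, PySem.Str.slice token none (some (-2)),
       PySem.Str.slice token none (some (-2)) ++ "e"]
    else if decide (3 < n) && PySem.Str.endswith token "es" then
      [token, PySem.Str.slice token none (some (-2)),
       PySem.Str.slice token none (some (-1))]
    else if decide (2 < n) && PySem.Str.endswith token "s" then
      [token, PySem.Str.slice token none (some (-1))]
    else [token]
  cands.filter (fun c => c != "")

-- ===== PRECONDITION & SPEC =====
def Spec_candidate_tokens_py (token : String) (out : List String) : Prop := out = candidate_tokens_py_alt token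
instance (token : String) (out : List String) : Decidable (Spec_candidate_tokens_py token out) := by unfold Spec_candidate_tokens_py; infer_instance

-- ===== CLAIM (what is proved, stated in full; the proofs are below) =====
def Claim_equal_candidate_tokens_py : Prop := ∀ (token : String), Dom_candidate_tokens_py token → Spec_candidate_tokens_py token (candidate_tokens_py token)

-- ===== LEMMAS AND PROOFS =====

-- two suffixes of the same list with the same length are equal
theorem pv_sfx_unique {l p q : List Char} (hp : p <:+ l) (hq : q <:+ l)
    (h : p.length = q.length) : p = q := by
  have := (List.prefix_of_prefix_length_le (List.reverse_prefix.mpr hp)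
    (List.reverse_prefix.mpr hq) (by simpa using h.le)).eq_of_length (by simpa using h)
  simpa using congrArg List.reverse this

-- A's (seen, out) dedup fold collapses to a truthiness filter when the candidates are duplicate-free
theorem pv_dedup_eq (cands : List String) :
    ∀ (seen : PySem.Set String) (out : List String),
      (∀ x, x ∈ seen ↔ x ∈ out) →
      (∀ c ∈ cands, c ∉ out) →
      cands.Nodup →
      (cands.foldl
        (fun (st : PySem.Set String × List String) item =>
          if item != "" && !(PySem.Set.contains st.1 item) then
            (PySem.Set.add st.1 item, st.2 ++ [item]) else st)
        (seen, out)).2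
      = out ++ cands.filter (fun c => c != "") := by
  induction cands with
  | nil => intro seen out _ _ _; simp
  | cons c cs ih =>
    intro seen out hinv hdisj hnd
    have hnout : c ∉ out := hdisj c (List.mem_cons_self ..)
    have hns : c ∉ seen := fun hm => hnout ((hinv c).mp hm)
    have hcc : PySem.Set.contains seen c = false := by
      simp [PySem.Set.contains_eq_listContains, List.contains_eq_mem, (hinv c), hnout]
    by_cases hc : c = ""
    · subst hc
      simp only [List.foldl, bne_self_eq_false, Bool.false_and, List.filter]
      rw [if_neg (by simp : ¬(false = true))]
      exact ih seen out hinv (fun d hd => hdisj d (List.mem_cons_of_mem _ hd)) hnd.of_cons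
    · have hcb : (c != "") = true := by simpa using hc
      simp only [List.foldl, hcc, Bool.not_false, Bool.and_true, if_true, List.filter, hcb]
      rw [ih (PySem.Set.add seen c) (out ++ [c])
        (by intro x
            rw [PySem.Set.add_of_not_mem hns]
            simp [List.mem_append, hinv x])
        (by intro d hd
            simp only [List.mem_append, List.mem_singleton]
            rintro (h1 | h1)
            · exact hdisj d (List.mem_cons_of_mem _ hd) h1
            · exact (List.nodup_cons.mp hnd).1 (h1 ▸ hd))
        hnd.of_cons]
      simp

-- strings with different toList lengths differ
theorem pv_ne_of_len {s t : String} (h : s.toList.length ≠ t.toList.length) : s ≠ t :=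
  fun he => h (by rw [he])

theorem pv_ends_iff (token p : String) : PySem.Str.endswith token p = true ↔ p.toList <:+ token.toList := by
  rw [PySem.Str.endswith_eq, PySem.Chars.endswith_iff]

-- a token whose last character is d does not end with a suffix whose last character is c ≠ d
theorem pv_not_ends (token p : String) (c : Char) (hc : [c] <:+ p.toList) {d : Char}
    (hd : [d] <:+ token.toList) (hne : c ≠ d) : PySem.Str.endswith token p = false := by
  cases h : PySem.Str.endswith token p with
  | false => rfl
  | true =>
    exact absurd (pv_sfx_unique (hc.trans ((pv_ends_iff token p).mp h)) hd rfl)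
      (by simp [hne])

-- toList of the three slice shapes
theorem pv_sl3 (token : String) :
    (PySem.Str.slice token none (some (-3))).toList = token.toList.take (token.toList.length - 3) := by
  simp [PySem.List.slice_to_neg_ofNat _ 3 (by norm_num)]

theorem pv_sl2 (token : String) :
    (PySem.Str.slice token none (some (-2))).toList = token.toList.take (token.toList.length - 2) := by
  simp [PySem.List.slice_to_neg_ofNat _ 2 (by norm_num)]

theorem pv_sl1 (token : String) :
    (PySem.Str.slice token none (some (-1))).toList = token.toList.dropLast := by
  simp [PySem.List.slice_to_neg_one]

theorem pv_and_false {b : Bool} {P : Prop} [Decidable P] (h : ¬(b = true ∧ P)) :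
    (b && decide P) = false := by
  cases b
  · rfl
  · simpa using fun hp => h ⟨rfl, hp⟩

theorem pv_and_false' {b : Bool} {P : Prop} [Decidable P] (h : ¬(b = true ∧ P)) :
    (decide P && b) = false := by
  rw [Bool.and_comm]; exact pv_and_false h

-- the case-by-case equivalence
theorem pv_main (token : String) : candidate_tokens_py token = candidate_tokens_py_alt token := by
  unfold candidate_tokens_py candidate_tokens_py_alt pvCandsA
  by_cases hc1 : PySem.Str.endswith token "ies" = true ∧ 3 < PySem.Str.len token
  · obtain ⟨hies, h3⟩ := hc1
    have hsfx := (pv_ends_iff token "ies").mp hies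
    have hsl : ['s'] <:+ token.toList := List.IsSuffix.trans (by decide) hsfx
    have hingf := pv_not_ends token "ing" 'g' (by decide) hsl (by decide)
    have hedf := pv_not_ends token "ed" 'd' (by decide) hsl (by decide)
    have hest : PySem.Str.endswith token "es" = true :=
      (pv_ends_iff token "es").mpr (List.IsSuffix.trans (by decide) hsfx)
    have hst : PySem.Str.endswith token "s" = true := (pv_ends_iff token "s").mpr hsl
    have h2 : (2:Int) < PySem.Str.len token := by omega
    simp only [hies, hingf, hedf, hest, hst, decide_eq_true h3, decide_eq_true h2,
      Bool.and_true, Bool.false_and, Bool.and_false,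
      Bool.false_eq_true, if_true, if_false]
    simp only [List.cons_append, List.nil_append]
    rw [pv_dedup_eq _ _ _ (fun x => by simp [PySem.Set.empty]) (by simp) ?nd, List.nil_append]
    case nd =>
      have hdec : "ies".toList = ['i','e','s'] := by decide
      rw [hdec] at hsfx
      obtain ⟨l₀, hdec'⟩ := hsfx
      have e0 : token.toList.length = l₀.length + 3 := by rw [← hdec']; simp
      have htk3 : token.toList.take (token.toList.length - 3) = l₀ := by
        rw [← hdec']; exact List.take_left' (by simp)
      have htk2 : token.toList.take (token.toList.length - 2) = l₀ ++ ['i'] := by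
        have h' : token.toList = (l₀ ++ ['i']) ++ ['e','s'] := by rw [← hdec']; simp
        rw [h']
        have : ((l₀ ++ ['i']) ++ ['e','s']).length - 2 = (l₀ ++ ['i']).length := by simp
        rw [this, List.take_left]
      have hA : (PySem.Str.slice token none (some (-3)) ++ "y").toList = l₀ ++ ['y'] := by
        rw [String.toList_append, pv_sl3, htk3, show "y".toList = ['y'] from by decide]
      have hB : (PySem.Str.slice token none (some (-2))).toList = l₀ ++ ['i'] := by
        rw [pv_sl2, htk2]
      have hC : (PySem.Str.slice token none (some (-1))).toList = l₀ ++ ['i', 'e'] := by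
        rw [pv_sl1, ← hdec']
        simp
      refine List.Nodup.of_map String.toList ?_
      rw [show [token, PySem.Str.slice token none (some (-3)) ++ "y",
            PySem.Str.slice token none (some (-2)),
            PySem.Str.slice token none (some (-1))].map String.toList
          = [l₀ ++ ['i','e','s'], l₀ ++ ['y'], l₀ ++ ['i'], l₀ ++ ['i','e']] by
        simp [hA, hB, hC, ← hdec']]
      simp only [List.nodup_cons, List.mem_cons, List.not_mem_nil,
        List.nodup_nil, and_true, not_or, not_false_iff]
      refine ⟨⟨?_, ?_, ?_⟩, ⟨?_, ?_⟩, ?_⟩ <;> intro he <;>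
        (have := List.append_cancel_left he; simp at this)
  · by_cases hc2 : PySem.Str.endswith token "ing" = true ∧ 4 < PySem.Str.len token
    · obtain ⟨hing, h4⟩ := hc2
      have hsfx := (pv_ends_iff token "ing").mp hing
      have hgl : ['g'] <:+ token.toList := List.IsSuffix.trans (by decide) hsfx
      have hiesf := pv_not_ends token "ies" 's' (by decide) hgl (by decide)
      have hedf := pv_not_ends token "ed" 'd' (by decide) hgl (by decide)
      have hesf := pv_not_ends token "es" 's' (by decide) hgl (by decide)
      have hsf := pv_not_ends token "s" 's' (by decide) hgl (by decide)
      have hn : 4 < token.length := by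
        have h4' := h4; simp [PySem.Str.len_eq] at h4'; omega
      simp only [hing, hiesf, hedf, hesf, hsf, decide_eq_true h4,
        Bool.and_true, Bool.false_and, Bool.and_false, Bool.false_eq_true, if_true, if_false]
      simp only [List.cons_append, List.nil_append]
      rw [pv_dedup_eq _ _ _ (fun x => by simp [PySem.Set.empty]) (by simp) ?nd2, List.nil_append]
      case nd2 =>
        simp only [List.nodup_cons, List.mem_cons, List.not_mem_nil, List.nodup_nil,
          and_true, not_or, not_false_iff]
        have s3 := fun (xs : List Char) => PySem.List.slice_to_neg_ofNat xs 3 (by norm_num)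
        refine ⟨⟨?_, ?_⟩, ?_⟩ <;> apply pv_ne_of_len <;> simp [s3] <;> omega
    · by_cases hc3 : PySem.Str.endswith token "ed" = true ∧ 3 < PySem.Str.len token
      · obtain ⟨hed, h3⟩ := hc3
        have hsfx := (pv_ends_iff token "ed").mp hed
        have hdl : ['d'] <:+ token.toList := List.IsSuffix.trans (by decide) hsfx
        have hiesf := pv_not_ends token "ies" 's' (by decide) hdl (by decide)
        have hingf := pv_not_ends token "ing" 'g' (by decide) hdl (by decide)
        have hesf := pv_not_ends token "es" 's' (by decide) hdl (by decide)
        have hsf := pv_not_ends token "s" 's' (by decide) hdl (by decide)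
        have hn : 3 < token.length := by
          have h3' := h3; simp [PySem.Str.len_eq] at h3'; omega
        simp only [hed, hiesf, hingf, hesf, hsf, decide_eq_true h3,
          Bool.and_true, Bool.false_and, Bool.and_false, Bool.false_eq_true, if_true, if_false]
        simp only [List.cons_append, List.nil_append]
        rw [pv_dedup_eq _ _ _ (fun x => by simp [PySem.Set.empty]) (by simp) ?nd3, List.nil_append]
        case nd3 =>
          simp only [List.nodup_cons, List.mem_cons, List.not_mem_nil, List.nodup_nil,
            and_true, not_or, not_false_iff]
          have s2 := fun (xs : List Char) => PySem.List.slice_to_neg_ofNat xs 2 (by norm_num)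
          refine ⟨⟨?_, ?_⟩, ?_⟩ <;> apply pv_ne_of_len <;> simp [s2] <;> omega
      · by_cases hc4 : PySem.Str.endswith token "es" = true ∧ 3 < PySem.Str.len token
        · obtain ⟨hes, h3⟩ := hc4
          have hsfx := (pv_ends_iff token "es").mp hes
          have hsl : ['s'] <:+ token.toList := List.IsSuffix.trans (by decide) hsfx
          have hingf := pv_not_ends token "ing" 'g' (by decide) hsl (by decide)
          have hedf := pv_not_ends token "ed" 'd' (by decide) hsl (by decide)
          have hiesf : PySem.Str.endswith token "ies" = false := by
            cases h : PySem.Str.endswith token "ies" with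
            | false => rfl
            | true => exact absurd ⟨h, h3⟩ hc1
          have hst : PySem.Str.endswith token "s" = true := (pv_ends_iff token "s").mpr hsl
          have h2 : (2:Int) < PySem.Str.len token := by omega
          have hn : 3 < token.length := by
            have h3' := h3; simp [PySem.Str.len_eq] at h3'; omega
          simp only [hes, hiesf, hingf, hedf, hst, decide_eq_true h3, decide_eq_true h2,
            Bool.and_true, Bool.false_and, Bool.and_false, Bool.false_eq_true, if_true, if_false]
          simp only [List.cons_append, List.nil_append]
          rw [pv_dedup_eq _ _ _ (fun x => by simp [PySem.Set.empty]) (by simp) ?nd4, List.nil_append]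
          case nd4 =>
            simp only [List.nodup_cons, List.mem_cons, List.not_mem_nil, List.nodup_nil,
              and_true, not_or, not_false_iff]
            have s2 := fun (xs : List Char) => PySem.List.slice_to_neg_ofNat xs 2 (by norm_num)
            refine ⟨⟨?_, ?_⟩, ?_⟩ <;> apply pv_ne_of_len <;>
              simp [s2, PySem.List.slice_to_neg_one] <;> omega
        · by_cases hc5 : PySem.Str.endswith token "s" = true ∧ 2 < PySem.Str.len token
          · obtain ⟨hs, h2⟩ := hc5
            have hsl := (pv_ends_iff token "s").mp hs
            have hingf := pv_not_ends token "ing" 'g' (by decide) hsl (by decide)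
            have hedf := pv_not_ends token "ed" 'd' (by decide) hsl (by decide)
            have hn : 2 < token.length := by
              have h2' := h2; simp [PySem.Str.len_eq] at h2'; omega
            have hnd : [token, PySem.Str.slice token none (some (-1))].Nodup := by
              simp only [List.nodup_cons, List.mem_cons, List.not_mem_nil, List.nodup_nil,
                and_true, not_or, not_false_iff]
              apply pv_ne_of_len; simp [PySem.List.slice_to_neg_one]; omega
            by_cases h3 : (3:Int) < PySem.Str.len token
            · have hesf : PySem.Str.endswith token "es" = false := by
                cases h : PySem.Str.endswith token "es" with
                | false => rfl
                | true => exact absurd ⟨h, h3⟩ hc4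
              have hiesf : PySem.Str.endswith token "ies" = false := by
                cases h : PySem.Str.endswith token "ies" with
                | false => rfl
                | true =>
                  have ht := (pv_ends_iff token "es").mpr
                    (List.IsSuffix.trans (by decide) ((pv_ends_iff token "ies").mp h))
                  rw [hesf] at ht
                  exact absurd ht (by simp)
              simp only [hs, hiesf, hingf, hedf, hesf, decide_eq_true h2,
                Bool.and_true, Bool.false_and, Bool.and_false,
                Bool.false_eq_true, if_true, if_false]
              simp only [List.cons_append, List.nil_append]
              rw [pv_dedup_eq _ _ _ (fun x => by simp [PySem.Set.empty]) (by simp) hnd,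
                List.nil_append]
            · have hd3 : decide ((3:Int) < PySem.Str.len token) = false := decide_eq_false h3
              have hd4 : decide ((4:Int) < PySem.Str.len token) = false :=
                decide_eq_false (by omega)
              simp only [hs, hingf, hedf, hd3, hd4, decide_eq_true h2,
                Bool.and_true, Bool.false_and, Bool.and_false,
                Bool.false_eq_true, if_true, if_false]
              simp only [List.cons_append, List.nil_append]
              rw [pv_dedup_eq _ _ _ (fun x => by simp [PySem.Set.empty]) (by simp) hnd,
                List.nil_append]
          · have hA_ies : (PySem.Str.endswith token "ies" && decide ((3:Int) < PySem.Str.len token)) = false :=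
              pv_and_false hc1
            have hA_ing : (PySem.Str.endswith token "ing" && decide ((4:Int) < PySem.Str.len token)) = false :=
              pv_and_false hc2
            have hA_ed : (PySem.Str.endswith token "ed" && decide ((3:Int) < PySem.Str.len token)) = false :=
              pv_and_false hc3
            have hA_es : (PySem.Str.endswith token "es" && decide ((3:Int) < PySem.Str.len token)) = false :=
              pv_and_false hc4
            have hA_s : (PySem.Str.endswith token "s" && decide ((2:Int) < PySem.Str.len token)) = false :=
              pv_and_false hc5
            have hB_ies := pv_and_false' hc1
            have hB_ing := pv_and_false' hc2
            have hB_ed := pv_and_false' hc3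
            have hB_es := pv_and_false' hc4
            have hB_s := pv_and_false' hc5
            simp only [hA_ies, hA_ing, hA_ed, hA_es, hA_s,
              hB_ies, hB_ing, hB_ed, hB_es, hB_s, Bool.false_eq_true, if_false]
            rw [pv_dedup_eq _ _ _ (fun x => by simp [PySem.Set.empty]) (by simp)
              (List.nodup_singleton token), List.nil_append]

-- ===== VERDICT (by name: the statement is the Claim_ definition above) =====
theorem candidate_tokens_py_spec : Claim_equal_candidate_tokens_py := by
  intro token _
  exact pv_main token
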